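-- pv_equiv track=rewrite | github.com/awakening-ai/ReactMotion | reactmotion/train/callback_diversity_eval.py | _seq_signature
-- ===== SOURCE A (Python) =====
-- def _seq_signature(ids, ignore_pad_id=-100, eos_id=None, max_len=None):
--     # ids: 1D list[int]
--     out = []
--     for x in ids:
--         if x == ignore_pad_id:
--             continue
--         if eos_id is not None and x == eos_id:
--             break
--         out.append(int(x))
--         if max_len is not None and len(out) >= max_len:
--             break
--     return tuple(out)
-- ===== SOURCE B (Python) =====
-- def _seq_signature(ids, ignore_pad_id=-100, eos_id=None, max_len=None):
--     # Declarative pipeline: filter pads, cut at the first eos, truncate, map to int.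
--     kept = [x for x in ids if x != ignore_pad_id]
--     if eos_id is not None and eos_id in kept:
--         kept = kept[:kept.index(eos_id)]
--     if max_len is not None:
--         kept = kept[:max_len]
--     return tuple(int(x) for x in kept)
-- ===== Notes on version B (the rewrite author's own statement) =====
-- stated objective: idiomatic
-- what changed: Replaces the single early-exit accumulator loop with a declarative pipeline (list-comprehension pad filter, cut at the first eos via list.index, slice to max_len, map to int); Pre_ excludes negative max_len, a nonsensical cap on which A's append-then-check loop and B's Python slice each produce an accidental value.
-- intended difference: When max_len == 0 and the sequence contains a qualifying token before any eos, A returns a one-element tuple because its loop checks the cap only after appending, while B returns the empty tuple, which is the intended result of a zero-length cap. — e.g. on _seq_signature([5], -100, none, some 0): A returns [5], B returns []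
-- outside the precondition, e.g. on _seq_signature([1, 2, 3], -100, None, -1): A returns (1,), B returns (1, 2); on _seq_signature([1, 2, 3], -100, None, -2): A returns (1,), B returns (1,)
import Mathlib
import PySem

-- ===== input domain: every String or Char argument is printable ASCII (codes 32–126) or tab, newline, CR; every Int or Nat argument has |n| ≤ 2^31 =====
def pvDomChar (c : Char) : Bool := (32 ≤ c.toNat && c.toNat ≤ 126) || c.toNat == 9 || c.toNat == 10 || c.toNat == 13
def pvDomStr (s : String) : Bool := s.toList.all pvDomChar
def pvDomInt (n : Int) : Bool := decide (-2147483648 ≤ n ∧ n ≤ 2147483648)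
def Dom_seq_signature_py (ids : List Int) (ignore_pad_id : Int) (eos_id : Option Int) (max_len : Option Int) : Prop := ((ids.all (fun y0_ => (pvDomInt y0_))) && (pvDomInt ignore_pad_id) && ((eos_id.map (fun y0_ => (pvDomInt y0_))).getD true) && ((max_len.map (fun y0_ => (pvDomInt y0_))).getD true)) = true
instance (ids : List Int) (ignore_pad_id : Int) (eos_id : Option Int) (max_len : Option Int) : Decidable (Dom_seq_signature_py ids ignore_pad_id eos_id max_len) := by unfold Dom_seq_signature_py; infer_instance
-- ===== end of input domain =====

-- B replaces A's early-exit accumulator loop by a declarative filter / cut-at-eos / truncate pipeline (idiomatic; same cost).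

-- ===== PORT A =====
-- the for-loop of A, carrying the accumulator `out` (appends at the back, as Python does)
def seqA_go (pad : Int) (eos : Option Int) (ml : Option Int) : List Int → List Int → List Int
  | [], out => out
  | x :: rest, out =>
    if x == pad then seqA_go pad eos ml rest out            -- continue
    else if (match eos with | some e => x == e | none => false) then out   -- break at eos
    else
      let out' := out ++ [x]                                 -- out.append(int(x)); int is identity on int
      match ml with
      | some m => if m ≤ (out'.length : Int) then out' else seqA_go pad eos ml rest out'
      | none => seqA_go pad eos ml rest out'

def seq_signature_py (ids : List Int) (ignore_pad_id : Int) (eos_id : Option Int) (max_len : Option Int) : List Int :=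
  seqA_go ignore_pad_id eos_id max_len ids []

-- ===== PORT B =====
def seq_signature_py_alt (ids : List Int) (ignore_pad_id : Int) (eos_id : Option Int) (max_len : Option Int) : List Int :=
  let kept := ids.filter (fun x => x != ignore_pad_id)       -- [x for x in ids if x != ignore_pad_id]
  let kept2 :=
    match eos_id with
    | some e =>
      match PySem.List.index? kept e with                    -- `eos_id in kept` + kept.index(eos_id)
      | some i => kept.take i                                -- kept[:i], i a nonnegative index
      | none => kept
    | none => kept
  let kept3 :=
    match max_len with
    | some m => PySem.List.slice kept2 none (some m)         -- kept[:max_len]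
    | none => kept2
  kept3.map (fun x => x)                                     -- tuple(int(x) for x in kept); int is identity on int

-- ===== PRECONDITION & SPEC =====
-- Pre_ excludes negative max_len (A still returns there): a nonsensical cap on which A's
-- append-then-check loop (one element kept) and B's Python slice (drop from the end) each
-- produce an accidental value no one would specify.
def Pre_seq_signature_py (ids : List Int) (ignore_pad_id : Int) (eos_id : Option Int) (max_len : Option Int) : Prop :=
  0 ≤ max_len.getD 0
instance (ids : List Int) (ignore_pad_id : Int) (eos_id : Option Int) (max_len : Option Int) : Decidable (Pre_seq_signature_py ids ignore_pad_id eos_id max_len) := by unfold Pre_seq_signature_py; infer_instance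
def pvWitness_seq_signature_py : List Int × Int × Option Int × Option Int := ([1, -100, 2, 7, 3], -100, some 7, some 2)

-- When max_len == 0 and ids contains a qualifying (non-pad, before-eos) token, A returns that one
-- token because its loop checks the cap only after appending, while B returns the empty tuple,
-- the intended result of a zero-length cap.
def D_seq_signature_py (ids : List Int) (ignore_pad_id : Int) (eos_id : Option Int) (max_len : Option Int) : Prop :=
  max_len = some 0 ∧
    ((ids.dropWhile (fun x => x == ignore_pad_id)).head?.any (fun v => eos_id != some v)) = true
instance (ids : List Int) (ignore_pad_id : Int) (eos_id : Option Int) (max_len : Option Int) : Decidable (D_seq_signature_py ids ignore_pad_id eos_id max_len) := by unfold D_seq_signature_py; infer_instance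

def Spec_seq_signature_py (ids : List Int) (ignore_pad_id : Int) (eos_id : Option Int) (max_len : Option Int) (out : List Int) : Prop := ¬ D_seq_signature_py ids ignore_pad_id eos_id max_len → out = seq_signature_py_alt ids ignore_pad_id eos_id max_len
instance (ids : List Int) (ignore_pad_id : Int) (eos_id : Option Int) (max_len : Option Int) (out : List Int) : Decidable (Spec_seq_signature_py ids ignore_pad_id eos_id max_len out) := by unfold Spec_seq_signature_py; infer_instance

def pvDiffWitness_seq_signature_py : List Int × Int × Option Int × Option Int := ([5], -100, none, some 0)
def pvDiffWitnessOut_seq_signature_py : (List Int) × (List Int) := ([5], [])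

-- ===== CLAIM (what is proved, stated in full; the proofs are below) =====
def Claim_unchanged_seq_signature_py : Prop := ∀ (ids : List Int) (ignore_pad_id : Int) (eos_id : Option Int) (max_len : Option Int), Dom_seq_signature_py ids ignore_pad_id eos_id max_len → Pre_seq_signature_py ids ignore_pad_id eos_id max_len → Spec_seq_signature_py ids ignore_pad_id eos_id max_len (seq_signature_py ids ignore_pad_id eos_id max_len)
def Claim_changed_seq_signature_py : Prop := Dom_seq_signature_py (pvDiffWitness_seq_signature_py.1) (pvDiffWitness_seq_signature_py.2.1) (pvDiffWitness_seq_signature_py.2.2.1) (pvDiffWitness_seq_signature_py.2.2.2) ∧ Pre_seq_signature_py (pvDiffWitness_seq_signature_py.1) (pvDiffWitness_seq_signature_py.2.1) (pvDiffWitness_seq_signature_py.2.2.1) (pvDiffWitness_seq_signature_py.2.2.2) ∧ D_seq_signature_py (pvDiffWitness_seq_signature_py.1) (pvDiffWitness_seq_signature_py.2.1) (pvDiffWitness_seq_signature_py.2.2.1) (pvDiffWitness_seq_signature_py.2.2.2) ∧ seq_signature_py (pvDiffWitness_seq_signature_py.1) (pvDiffWitness_seq_signature_py.2.1) (pvDiffWitness_seq_signature_py.2.2.1)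 (pvDiffWitness_seq_signature_py.2.2.2) = pvDiffWitnessOut_seq_signature_py.1 ∧ seq_signature_py_alt (pvDiffWitness_seq_signature_py.1) (pvDiffWitness_seq_signature_py.2.1) (pvDiffWitness_seq_signature_py.2.2.1) (pvDiffWitness_seq_signature_py.2.2.2) = pvDiffWitnessOut_seq_signature_py.2 ∧ pvDiffWitnessOut_seq_signature_py.1 ≠ pvDiffWitnessOut_seq_signature_py.2
def Claim_exact_seq_signature_py : Prop := ∀ (ids : List Int) (ignore_pad_id : Int) (eos_id : Option Int) (max_len : Option Int), Dom_seq_signature_py ids ignore_pad_id eos_id max_len → Pre_seq_signature_py ids ignore_pad_id eos_id max_len → D_seq_signature_py ids ignore_pad_id eos_id max_len → seq_signature_py ids ignore_pad_id eos_id max_len ≠ seq_signature_py_alt ids ignore_pad_id eos_id max_len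

-- ===== LEMMAS AND PROOFS =====

-- the "filtered prefix up to eos" both programs compute before truncation
def fte (pad : Int) (eos : Option Int) : List Int → List Int
  | [] => []
  | x :: r =>
    if x = pad then fte pad eos r
    else match eos with
      | some e => if x = e then [] else x :: fte pad eos r
      | none => x :: fte pad eos r

-- A with no cap produces out ++ fte
theorem seqA_go_none (pad : Int) (eos : Option Int) (ids out : List Int) :
    seqA_go pad eos none ids out = out ++ fte pad eos ids := by
  induction ids generalizing out with
  | nil => simp [seqA_go, fte]
  | cons x r ih =>
    by_cases hp : x = pad
    · simp [seqA_go, fte, hp, ih]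
    · cases eos with
      | none => simp [seqA_go, fte, hp, ih]
      | some e =>
        by_cases he : x = e
        · subst he; simp [seqA_go, fte, hp]
        · simp [seqA_go, fte, hp, he, ih]

-- A with cap m keeps max (m - out.length) 1 more elements of fte
theorem seqA_go_some (pad : Int) (eos : Option Int) (m : Int) (ids out : List Int) :
    seqA_go pad eos (some m) ids out
      = out ++ (fte pad eos ids).take (max (m - out.length) 1).toNat := by
  induction ids generalizing out with
  | nil => simp [seqA_go, fte]
  | cons x r ih =>
    by_cases hp : x = pad
    · simp only [seqA_go, hp, if_pos, beq_self_eq_true, fte]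
      simpa [hp] using ih out
    · have hstep :
        (if m ≤ ((out ++ [x]).length : Int) then out ++ [x]
         else seqA_go pad eos (some m) r (out ++ [x]))
          = out ++ (x :: fte pad eos r).take (max (m - out.length) 1).toNat := by
        by_cases hm : m ≤ ((out ++ [x]).length : Int)
        · rw [if_pos hm]
          have h1 : (max (m - out.length) 1).toNat = 1 := by
            simp at hm; omega
          simp [h1]
        · rw [if_neg hm, ih (out ++ [x])]
          have h2 : (max (m - (out.length : Int)) 1).toNat
              = (max (m - ((out ++ [x]).length : Int)) 1).toNat + 1 := by
            simp at hm ⊢; omega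
          rw [h2, List.take_succ_cons]
          simp
      cases eos with
      | none => simpa [seqA_go, fte, hp] using hstep
      | some e =>
        by_cases he : x = e
        · subst he; simp [seqA_go, fte, hp]
        · simpa [seqA_go, fte, hp, he] using hstep

-- cutting the pad-filtered list at the first eos occurrence is takeWhile (≠ e)
theorem index_cut_eq_takeWhile (e : Int) (l : List Int) :
    (match PySem.List.index? l e with
     | some i => l.take i
     | none => l) = l.takeWhile (fun x => x != e) := by
  induction l with
  | nil => simp [PySem.List.index?_eq_idxOf?]
  | cons x r ih =>
    simp only [PySem.List.index?_eq_idxOf?] at ih ⊢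
    by_cases hx : x = e
    · subst hx; simp [List.idxOf?_cons]
    · rw [List.idxOf?_cons]
      simp only [beq_iff_eq, hx, if_false]
      rw [List.takeWhile_cons_of_pos (by simpa using hx)]
      cases h : r.idxOf? e with
      | none => rw [h] at ih; simpa using congrArg (x :: ·) ih
      | some i => rw [h] at ih; simpa using congrArg (x :: ·) ih

-- fte = takeWhile-after-filter (some eos) / filter (none)
theorem fte_eq_pipeline (pad : Int) (eos : Option Int) (ids : List Int) :
    fte pad eos ids
      = (match eos with
         | some e => (ids.filter (fun x => x != pad)).takeWhile (fun x => x != e)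
         | none => ids.filter (fun x => x != pad)) := by
  induction ids with
  | nil => cases eos <;> simp [fte]
  | cons x r ih =>
    by_cases hp : x = pad
    · cases eos <;> simp_all [fte]
    · cases eos with
      | none => simp_all [fte]
      | some e =>
        by_cases he : x = e
        · simp_all [fte]
        · simp_all [fte]

theorem alt_eq_fte (ids : List Int) (pad : Int) (eos : Option Int) (m : Int) (hm : 0 ≤ m) :
    seq_signature_py_alt ids pad eos (some m) = (fte pad eos ids).take m.toNat := by
  cases eos with
  | none =>
    simp [seq_signature_py_alt, fte_eq_pipeline, PySem.List.slice_to _ hm]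
  | some e =>
    have h := index_cut_eq_takeWhile e (ids.filter (fun x => x != pad))
    simp only [PySem.List.index?_eq_idxOf?] at h
    simp [seq_signature_py_alt, fte_eq_pipeline, h, PySem.List.slice_to _ hm]

theorem alt_none_eq_fte (ids : List Int) (pad : Int) (eos : Option Int) :
    seq_signature_py_alt ids pad eos none = fte pad eos ids := by
  cases eos with
  | none => simp [seq_signature_py_alt, fte_eq_pipeline]
  | some e =>
    have h := index_cut_eq_takeWhile e (ids.filter (fun x => x != pad))
    simp only [PySem.List.index?_eq_idxOf?] at h
    simp [seq_signature_py_alt, fte_eq_pipeline, h]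

-- the D_ head-test holds exactly when there is a qualifying token, i.e. fte is nonempty
theorem dcond_iff_fte_ne_nil (pad : Int) (eos : Option Int) (ids : List Int) :
    ((ids.dropWhile (fun x => x == pad)).head?.any (fun v => eos != some v)) = true
      ↔ fte pad eos ids ≠ [] := by
  induction ids with
  | nil => simp [fte]
  | cons x r ih =>
    by_cases hp : x = pad
    · simpa [List.dropWhile_cons, hp, fte] using ih
    · cases eos with
      | none => simp [List.dropWhile_cons, hp, fte]
      | some e =>
        by_cases he : x = e
        · subst he
          simp [List.dropWhile_cons, hp, fte]
        · simp [List.dropWhile_cons, hp, he, fte, Ne.symm he]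

-- ===== VERDICT (by name: the statement is the Claim_ definition above) =====
theorem seq_signature_py_spec : Claim_unchanged_seq_signature_py := by
  intro ids pad eos ml _ hpre hnd
  show seq_signature_py ids pad eos ml = seq_signature_py_alt ids pad eos ml
  cases ml with
  | none =>
    rw [alt_none_eq_fte]
    simpa using seqA_go_none pad eos ids []
  | some m =>
    have hm : 0 ≤ m := hpre
    rw [alt_eq_fte ids pad eos m hm]
    have hA : seq_signature_py ids pad eos (some m) = (fte pad eos ids).take (max m 1).toNat := by
      simpa using seqA_go_some pad eos m ids []
    by_cases h0 : m = 0
    · subst h0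
      have hfte : fte pad eos ids = [] := by
        by_contra hne
        exact hnd ⟨rfl, (dcond_iff_fte_ne_nil pad eos ids).mpr hne⟩
      simp [hA, hfte]
    · have : (max m 1).toNat = m.toNat := by omega
      rw [hA, this]

theorem seq_signature_py_changed : Claim_changed_seq_signature_py := by
  unfold Claim_changed_seq_signature_py; decide

theorem seq_signature_py_tight : Claim_exact_seq_signature_py := by
  intro ids pad eos ml _ hpre hd
  obtain ⟨hml, hcond⟩ := hd
  subst hml
  have hne : fte pad eos ids ≠ [] := (dcond_iff_fte_ne_nil pad eos ids).mp hcond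
  have hA : seq_signature_py ids pad eos (some 0) = (fte pad eos ids).take 1 := by
    simpa using seqA_go_some pad eos 0 ids []
  have hB : seq_signature_py_alt ids pad eos (some 0) = [] := by
    simpa using alt_eq_fte ids pad eos 0 le_rfl
  rw [hA, hB]
  cases h : fte pad eos ids with
  | nil => exact absurd h hne
  | cons y ys => simp
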